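-- pv_equiv track=rewrite | github.com/MelihSahinEdu/MCArithmetic | zero_order_encoding_without_EOF.py | encode_a_word_zero_order_hufmann_without_eof
-- ===== SOURCE A (Python) =====
-- def encode_a_word_zero_order_hufmann_without_eof(encoding, word):
--     string = word
--     encoded = ""
--     for k in range(len(string)):
--         encoded += str(encoding[string[k]])
--
--     returned=[]
--     for t in range(len(encoded)):
--         returned.append(int(encoded[t]))
--     return returned
-- ===== SOURCE B (Python) =====
-- def encode_a_word_zero_order_hufmann_without_eof(encoding, word):
--     # Arithmetic digit extraction with a per-character memo table:
--     # each distinct character's code is decomposed into decimal digits once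
--     # by divmod arithmetic (no str()/int() round-trip, no intermediate string),
--     # then the cached digit lists are concatenated along the word.
--     table = {}
--     out = []
--     for ch in word:
--         if ch not in table:
--             n = encoding[ch]
--             ds = []
--             while n >= 10:
--                 ds.append(n % 10)
--                 n //= 10
--             ds.append(n)
--             ds.reverse()
--             table[ch] = ds
--         out.extend(table[ch])
--     return out
-- ===== Notes on version B (the rewrite author's own statement) =====
-- stated objective: alternative
-- what changed: A stringifies every code, concatenates all of them into one string and re-parses it digit char by digit char with int(); B never touches strings: it extracts each code's decimal digits by divmod arithmetic, memoises the digit list per distinct character in a dict, and concatenates the cached lists along the word.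
import Mathlib
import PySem

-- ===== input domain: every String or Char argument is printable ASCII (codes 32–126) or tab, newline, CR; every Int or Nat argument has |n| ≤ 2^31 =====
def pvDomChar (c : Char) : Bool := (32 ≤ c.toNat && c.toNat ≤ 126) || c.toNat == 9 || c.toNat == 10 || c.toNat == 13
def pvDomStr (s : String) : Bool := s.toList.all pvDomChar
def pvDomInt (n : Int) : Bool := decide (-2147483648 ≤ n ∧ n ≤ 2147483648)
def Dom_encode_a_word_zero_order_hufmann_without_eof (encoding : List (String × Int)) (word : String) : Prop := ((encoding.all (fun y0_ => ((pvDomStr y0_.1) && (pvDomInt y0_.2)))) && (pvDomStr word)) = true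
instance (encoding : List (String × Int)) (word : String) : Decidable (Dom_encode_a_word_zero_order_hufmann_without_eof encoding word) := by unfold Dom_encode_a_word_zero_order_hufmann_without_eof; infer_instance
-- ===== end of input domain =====

-- B replaces A's stringify-concatenate-reparse pipeline by pure divmod digit
-- extraction with a per-character memo table (objective: alternative).

-- ===== PORT A =====
-- str(encoding[string[k]]) for a present key; the getD default 0 is only
-- reached outside Pre_ (Python raises KeyError there).
def pvCodeChars (encoding : List (String × Int)) (c : Char) : List Char :=
  PySem.Int.toChars ((PySem.Dict.ofList encoding).getD (String.singleton c) 0)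

-- int(encoded[t]); the getD default 0 is only reached outside Pre_ (Python raises ValueError there).
def pvDigit (ch : Char) : Int := (PySem.Int.ofChars? [ch]).getD 0

def encode_a_word_zero_order_hufmann_without_eof (encoding : List (String × Int)) (word : String) : List Int :=
  -- first loop: encoded += str(encoding[string[k]])
  let encoded : List Char := word.toList.foldl (fun acc c => acc ++ pvCodeChars encoding c) []
  -- second loop: returned.append(int(encoded[t]))
  encoded.foldl (fun acc ch => acc ++ [pvDigit ch]) []

-- ===== PORT B =====
-- the while loop: while n >= 10: ds.append(n % 10); n //= 10 — then ds.append(n)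
def pvDigitLoop (n : Int) (ds : List Int) : List Int :=
  if _h : 10 ≤ n then
    pvDigitLoop (PySem.Int.floordiv n 10) (ds ++ [PySem.Int.mod n 10])
  else ds ++ [n]
termination_by n.toNat
decreasing_by
  rw [PySem.Int.floordiv_eq_ediv_of_pos (by omega)]
  omega

-- table[ch] is always present when read (the branch just inserted it); getD's
-- default [] is never reached.
def encode_a_word_zero_order_hufmann_without_eof_alt (encoding : List (String × Int)) (word : String) : List Int :=
  (word.toList.foldl
    (fun (st : PySem.Dict Char (List Int) × List Int) ch =>
      let table :=
        if st.1.contains ch then st.1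
        else st.1.insert ch
          ((pvDigitLoop ((PySem.Dict.ofList encoding).getD (String.singleton ch) 0) []).reverse)
      (table, st.2 ++ table.getD ch []))
    (PySem.Dict.empty, [])).2

-- ===== PRECONDITION & SPEC =====
-- Pre_ excludes exactly the inputs where Python A raises: a character of word missing
-- from the dict (KeyError) or mapped to a negative code whose '-' char fails int() (ValueError).
def Pre_encode_a_word_zero_order_hufmann_without_eof (encoding : List (String × Int)) (word : String) : Prop :=
  (word.toList.all (fun c =>
    ((PySem.Dict.ofList encoding).get? (String.singleton c)).isSome &&
    decide (0 ≤ (PySem.Dict.ofList encoding).getD (String.singleton c) 0))) = true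
instance (encoding : List (String × Int)) (word : String) : Decidable (Pre_encode_a_word_zero_order_hufmann_without_eof encoding word) := by unfold Pre_encode_a_word_zero_order_hufmann_without_eof; infer_instance

def pvWitness_encode_a_word_zero_order_hufmann_without_eof : (List (String × Int)) × String := ([("a", 12), ("b", 0)], "aba")

def Spec_encode_a_word_zero_order_hufmann_without_eof (encoding : List (String × Int)) (word : String) (out : List Int) : Prop := out = encode_a_word_zero_order_hufmann_without_eof_alt encoding word
instance (encoding : List (String × Int)) (word : String) (out : List Int) : Decidable (Spec_encode_a_word_zero_order_hufmann_without_eof encoding word out) := by unfold Spec_encode_a_word_zero_order_hufmann_without_eof; infer_instance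

-- ===== CLAIM =====
def Claim_equal_encode_a_word_zero_order_hufmann_without_eof : Prop := ∀ (encoding : List (String × Int)) (word : String), Dom_encode_a_word_zero_order_hufmann_without_eof encoding word → Pre_encode_a_word_zero_order_hufmann_without_eof encoding word → Spec_encode_a_word_zero_order_hufmann_without_eof encoding word (encode_a_word_zero_order_hufmann_without_eof encoding word)

-- ===== LEMMAS AND PROOFS =====

-- the digits of a char's code, most significant first (the meaning both sides compute)
def pvDigitsMS (m : Nat) : List Int :=
  if _h : m < 10 then [(m : Int)]
  else pvDigitsMS (m / 10) ++ [((m % 10 : Nat) : Int)]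
decreasing_by omega

-- Nat.toDigitsCore with enough fuel produces the digits MSB-first onto the accumulator
theorem pv_toDigitsCore_eq (fuel : Nat) : ∀ (n : Nat) (acc : List Char), n < fuel →
    Nat.toDigitsCore 10 fuel n acc = (pvDigitsMS n).map (fun d => Nat.digitChar d.toNat) ++ acc := by
  induction fuel with
  | zero => intro n acc h; omega
  | succ f ih =>
    intro n acc h
    rw [Nat.toDigitsCore]
    by_cases h10 : n < 10
    · have hdiv : n / 10 = 0 := by omega
      rw [pvDigitsMS]
      simp [hdiv, h10, Nat.mod_eq_of_lt h10]
    · have hdiv : ¬ n / 10 = 0 := by omega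
      have hcast : ((n : Int) % 10).toNat = n % 10 := by omega
      rw [if_neg hdiv, ih (n / 10) _ (by omega)]
      conv_rhs => rw [pvDigitsMS]
      simp [h10, hcast]

theorem pv_toDigits_eq (n : Nat) :
    Nat.toDigits 10 n = (pvDigitsMS n).map (fun d => Nat.digitChar d.toNat) := by
  have := pv_toDigitsCore_eq (n + 1) n [] (by omega)
  simpa [Nat.toDigits] using this

theorem pvDigit_digitChar (d : Nat) (h : d < 10) : pvDigit (Nat.digitChar d) = (d : Int) := by
  interval_cases d <;> decide

-- mapping int() over str(n)'s characters recovers the MSB-first digit list (n ≥ 0)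
theorem pv_map_pvDigit_toChars (n : Int) (h : 0 ≤ n) :
    (PySem.Int.toChars n).map pvDigit = pvDigitsMS n.toNat := by
  have hn : ¬ n < 0 := by omega
  rw [PySem.Int.toChars, if_neg hn, pv_toDigits_eq, List.map_map]
  have : ∀ m : Nat, (pvDigitsMS m).map (pvDigit ∘ fun d => Nat.digitChar d.toNat) = pvDigitsMS m := by
    intro m
    induction m using Nat.strong_induction_on with
    | _ m ih =>
      by_cases h10 : m < 10
      · rw [pvDigitsMS]
        simp only [h10, dif_pos, List.map_cons, List.map_nil, Function.comp_apply, Int.toNat_natCast]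
        rw [pvDigit_digitChar m h10]
      · rw [pvDigitsMS]
        simp only [h10, dif_neg, not_false_iff, List.map_append, List.map_cons, List.map_nil,
          Function.comp_apply, Int.toNat_natCast]
        rw [ih (m / 10) (by omega), pvDigit_digitChar (m % 10) (by omega)]
  exact this n.toNat

-- the while loop appends the LSB-first digits to its accumulator
def pvDigitsLS (n : Int) : List Int :=
  if _h : 10 ≤ n then PySem.Int.mod n 10 :: pvDigitsLS (PySem.Int.floordiv n 10)
  else [n]
termination_by n.toNat
decreasing_by
  rw [PySem.Int.floordiv_eq_ediv_of_pos (by omega)]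
  omega

theorem pvDigitLoop_eq (n : Int) : ∀ ds, pvDigitLoop n ds = ds ++ pvDigitsLS n := by
  induction n using pvDigitsLS.induct with
  | case1 n h ih =>
    intro ds
    rw [pvDigitLoop, dif_pos h, ih]
    conv_rhs => rw [pvDigitsLS]
    simp [h]
  | case2 n h =>
    intro ds
    rw [pvDigitLoop, dif_neg h, pvDigitsLS, dif_neg h]

theorem pvDigitsLS_reverse (n : Int) (h : 0 ≤ n) :
    (pvDigitsLS n).reverse = pvDigitsMS n.toNat := by
  induction n using pvDigitsLS.induct with
  | case1 n h10 ih =>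
    have hd : PySem.Int.floordiv n 10 = n / 10 := PySem.Int.floordiv_eq_ediv_of_pos (by omega)
    have hm : PySem.Int.mod n 10 = n % 10 := PySem.Int.mod_eq_emod_of_pos (by omega)
    rw [pvDigitsLS, dif_pos h10]
    simp only [List.reverse_cons]
    rw [ih (by rw [hd]; omega)]
    conv_rhs => rw [pvDigitsMS]
    have h10' : ¬ n.toNat < 10 := by omega
    rw [dif_neg h10']
    congr 1
    · congr 1
      rw [hd]
      omega
    · rw [hm]
      simp only [List.cons.injEq, and_true]
      omega
  | case2 n h10 =>
    rw [pvDigitsLS, dif_neg h10, pvDigitsMS]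
    have : n.toNat < 10 := by omega
    simp [this, h]

-- per admitted character, both sides compute pvDigitsMS of its code
theorem pv_code_eq (encoding : List (String × Int)) (c : Char)
    (h : 0 ≤ (PySem.Dict.ofList encoding).getD (String.singleton c) 0) :
    (pvCodeChars encoding c).map pvDigit
      = (pvDigitLoop ((PySem.Dict.ofList encoding).getD (String.singleton c) 0) []).reverse := by
  rw [pvCodeChars, pv_map_pvDigit_toChars _ h, pvDigitLoop_eq, List.nil_append,
    pvDigitsLS_reverse _ h]

-- the memo-table fold: as long as every cached list is the value the miss branch
-- would compute, the fold appends exactly the flatMap of those values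
theorem pv_memo_fold (f : Char → List Int) :
    ∀ (l : List Char) (table : PySem.Dict Char (List Int)) (out : List Int),
    (∀ k v, table.get? k = some v → v = f k) →
    (l.foldl
      (fun (st : PySem.Dict Char (List Int) × List Int) ch =>
        let table := if st.1.contains ch then st.1 else st.1.insert ch (f ch)
        (table, st.2 ++ table.getD ch []))
      (table, out)).2 = out ++ l.flatMap f := by
  intro l
  induction l with
  | nil => intro table out _; simp
  | cons ch rest ih =>
    intro table out hinv
    simp only [List.foldl_cons, List.flatMap_cons]
    by_cases hc : table.contains ch = true
    · have hsome : (table.get? ch).isSome := by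
        rw [← PySem.Dict.contains_eq_isSome_get?, hc]
      obtain ⟨v, hv⟩ := Option.isSome_iff_exists.mp hsome
      have hgd : table.getD ch [] = f ch := by
        rw [PySem.Dict.getD_eq_get?_getD, hv, Option.getD_some]
        exact hinv ch v hv
      simp only [hc, if_true, hgd]
      rw [ih table _ hinv, List.append_assoc]
    · have hc' : table.contains ch = false := by simpa using hc
      simp only [hc', Bool.false_eq_true, if_false]
      rw [PySem.Dict.getD_insert_self]
      rw [ih (table.insert ch (f ch)) _ ?_, List.append_assoc]
      intro k v hkv
      by_cases hk : k = ch
      · subst hk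
        rw [PySem.Dict.get?_insert_self] at hkv
        exact (Option.some.injEq _ _ ▸ hkv).symm
      · simp only [PySem.Dict.get?_insert, hk, if_false] at hkv
        exact hinv k v hkv

-- ===== VERDICT =====
theorem encode_a_word_zero_order_hufmann_without_eof_spec : Claim_equal_encode_a_word_zero_order_hufmann_without_eof := by
  intro encoding word _ hpre
  unfold Spec_encode_a_word_zero_order_hufmann_without_eof
  unfold encode_a_word_zero_order_hufmann_without_eof encode_a_word_zero_order_hufmann_without_eof_alt
  rw [PySem.List.foldl_append_singleton_eq_map, PySem.List.foldl_append_eq_flatMap]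
  rw [pv_memo_fold
      (fun ch => (pvDigitLoop ((PySem.Dict.ofList encoding).getD (String.singleton ch) 0) []).reverse)
      word.toList PySem.Dict.empty []
      (by intro k v h; rw [PySem.Dict.get?_empty] at h; exact absurd h (by simp))]
  simp only [List.nil_append]
  rw [List.map_flatMap]
  apply List.flatMap_congr
  intro c hc
  unfold Pre_encode_a_word_zero_order_hufmann_without_eof at hpre
  rw [List.all_eq_true] at hpre
  have := hpre c hc
  simp only [Bool.and_eq_true, decide_eq_true_eq] at this
  exact pv_code_eq encoding c this.2
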